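-- pv_equiv track=rewrite | github.com/Ishikaaa/Sabudh-Foundations | Test 1/question_4.py | answer
-- ===== SOURCE A (Python) =====
-- def answer(A):
--   A_set=set(A)
--   if len(A)!=len(A_set):
--     return "true"
--   len_A=len(A)
--   list_sum=[]
--   for i in range(len_A):
--     for j in range(i+1, len_A):
--       a=A[i]
--       b=A[j]
--       sum_a_b=a+b
--       if sum_a_b in list_sum:
--         return "true"
--       list_sum.append(sum_a_b)
--   return "false"
-- ===== SOURCE B (Python) =====
-- def answer(A):
--     def has_adjacent_dup(xs):
--         s = sorted(xs)
--         return any(x == y for x, y in zip(s, s[1:]))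
--     if has_adjacent_dup(A):
--         return "true"
--     sums = [A[i] + A[j] for i in range(len(A)) for j in range(i + 1, len(A))]
--     return "true" if has_adjacent_dup(sums) else "false"
-- ===== Notes on version B (the rewrite author's own statement) =====
-- stated objective: alternative
-- what changed: Replaces both of A's hash/membership-based duplicate detections (set-size guard and the membership-guarded nested loop with early exit) by sort-then-adjacent-scan: sort the elements (and then the list of pairwise sums) and report a duplicate iff two neighbours are equal.
import Mathlib
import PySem

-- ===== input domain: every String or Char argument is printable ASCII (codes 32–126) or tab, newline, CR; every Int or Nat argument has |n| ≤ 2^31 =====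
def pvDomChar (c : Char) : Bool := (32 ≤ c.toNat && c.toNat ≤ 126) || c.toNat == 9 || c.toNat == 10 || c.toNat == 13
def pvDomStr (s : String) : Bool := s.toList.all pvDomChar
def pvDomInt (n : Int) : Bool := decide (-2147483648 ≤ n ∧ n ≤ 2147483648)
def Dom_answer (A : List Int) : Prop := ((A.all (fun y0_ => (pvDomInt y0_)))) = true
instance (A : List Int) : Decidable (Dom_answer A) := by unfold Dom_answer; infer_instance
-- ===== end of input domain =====

-- B replaces A's set-size guard and membership-guarded nested loop by sort-then-adjacent-scan
-- duplicate detection on the elements and on the list of pairwise sums (alternative algorithm).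


-- ===== PORT A =====
-- one step of A's inner-loop body: the early `return "true"` is the `none` state
def answerStep (acc : Option (List Int)) (s : Int) : Option (List Int) :=
  match acc with
  | none => none
  | some ls => if s ∈ ls then none else some (ls ++ [s])

def answer (A : List Int) : String :=
  let A_set := PySem.Set.ofList A
  if A.length ≠ PySem.Set.len A_set then "true"
  else
    let len_A : Int := A.length
    let res := (PySem.List.pyRange 0 len_A 1).foldl (fun acc i =>
      (PySem.List.pyRange (i + 1) len_A 1).foldl (fun acc j =>
        answerStep acc (PySem.List.pyGetD A i 0 + PySem.List.pyGetD A j 0)) acc)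
      (some ([] : List Int))
    match res with
    | none => "true"
    | some _ => "false"

-- ===== PORT B =====
-- has_adjacent_dup: sort, then scan neighbouring pairs for an equal pair
def hasAdjDup (xs : List Int) : Bool :=
  ((PySem.List.sorted xs (fun x => x) false).zip
    (PySem.List.slice (PySem.List.sorted xs (fun x => x) false) (some 1) none)).any
    (fun p => p.1 == p.2)

def answer_alt (A : List Int) : String :=
  if hasAdjDup A then "true"
  else
    let sums := (PySem.List.pyRange 0 (A.length : Int) 1).flatMap (fun i =>
      (PySem.List.pyRange (i + 1) (A.length : Int) 1).map (fun j =>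
        PySem.List.pyGetD A i 0 + PySem.List.pyGetD A j 0))
    if hasAdjDup sums then "true" else "false"

-- ===== PRECONDITION & SPEC =====
def Spec_answer (A : List Int) (out : String) : Prop := out = answer_alt A
instance (A : List Int) (out : String) : Decidable (Spec_answer A out) := by unfold Spec_answer; infer_instance

-- ===== CLAIM (what is proved, stated in full; the proofs are below) =====
def Claim_equal_answer : Prop := ∀ (A : List Int), Dom_answer A → Spec_answer A (answer A)

-- ===== LEMMAS AND PROOFS =====

-- canonical list of pairwise sums A[i]+A[j], i<j, in traversal order
def pairSums : List Int → List Int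
  | [] => []
  | x :: xs => xs.map (fun y => x + y) ++ pairSums xs

-- len(set(l)) == len(l) detects Nodup
lemma len_ofList_eq_iff_nodup (l : List Int) :
    (PySem.Set.ofList l).length = l.length ↔ l.Nodup := by
  constructor
  · intro h
    have h1 := PySem.Set.nodup_ofList (xs := l)
    have h2 : (PySem.Set.ofList l).toFinset = l.toFinset := by
      ext x; simp [PySem.Set.mem_ofList]
    have h4 : l.toFinset.card = l.length := by
      rw [← h2, List.toFinset_card_of_nodup h1, h]
    rw [List.card_toFinset] at h4
    exact List.dedup_eq_self.mp (l.dedup_sublist.eq_of_length h4)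
  · intro h
    rw [PySem.Set.ofList_eq_self_of_nodup l h]

lemma foldl_answerStep_none (L : List Int) : L.foldl answerStep none = none := by
  induction L with
  | nil => rfl
  | cons s L ih => simpa [answerStep] using ih

-- A's early-exit scan over a list of sums fails exactly on a duplicate
lemma scan_eq_none_iff (L ls : List Int) (h : ls.Nodup) :
    L.foldl answerStep (some ls) = none ↔ ¬ (ls ++ L).Nodup := by
  induction L generalizing ls with
  | nil => simp [h]
  | cons s L ih =>
    rw [List.foldl_cons,
        show answerStep (some ls) s = if s ∈ ls then none else some (ls ++ [s]) from rfl]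
    by_cases hs : s ∈ ls
    · rw [if_pos hs, foldl_answerStep_none]
      have hnd : ¬ (ls ++ s :: L).Nodup := fun hn =>
        (List.disjoint_of_nodup_append hn) hs List.mem_cons_self
      exact iff_of_true rfl hnd
    · have hnd : (ls ++ [s]).Nodup := by
        simp [List.nodup_append, h]
        exact fun a ha he => hs (he ▸ ha)
      rw [if_neg hs, ih (ls ++ [s]) hnd,
          show ls ++ s :: L = (ls ++ [s]) ++ L from List.append_cons ls s L]

-- A's nested index loops generate exactly pairSums
lemma a_flat (pre suf : List Int) :
    (PySem.List.pyRange (pre.length : Int) ((pre ++ suf).length : Int) 1).flatMap (fun i =>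
      (PySem.List.pyRange (i + 1) ((pre ++ suf).length : Int) 1).map (fun j =>
        PySem.List.pyGetD (pre ++ suf) i 0 + PySem.List.pyGetD (pre ++ suf) j 0))
      = pairSums suf := by
  induction suf generalizing pre with
  | nil => rw [PySem.List.pyRange_one_eq_nil (by simp)]; rfl
  | cons x xs ih =>
    have hlt : (pre.length : Int) < ((pre ++ x :: xs).length : Int) := by
      simp only [List.length_append, List.length_cons]; push_cast; omega
    rw [PySem.List.pyRange_one_cons hlt, List.flatMap_cons]
    have hx : PySem.List.pyGetD (pre ++ x :: xs) (pre.length : Int) 0 = x := by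
      rw [PySem.List.pyGetD_natCast, List.getD_eq_getElem _ _ (by simp)]
      simp
    have hdrop : (PySem.List.pyRange ((pre.length : Int) + 1) ((pre ++ x :: xs).length : Int) 1).map
        (fun j => PySem.List.pyGetD (pre ++ x :: xs) j 0) = xs := by
      rw [PySem.List.map_pyGetD_pyRange' _ _ (by positivity)]
      have h1 : ((pre.length : Int) + 1).toNat = (pre ++ [x]).length := by simp
      rw [h1, show pre ++ x :: xs = (pre ++ [x]) ++ xs by simp, List.drop_left]
    have hmap : (PySem.List.pyRange ((pre.length : Int) + 1) ((pre ++ x :: xs).length : Int) 1).map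
        (fun j => PySem.List.pyGetD (pre ++ x :: xs) (pre.length : Int) 0 +
          PySem.List.pyGetD (pre ++ x :: xs) j 0) = xs.map (fun y => x + y) := by
      have hfun : (fun j => PySem.List.pyGetD (pre ++ x :: xs) (pre.length : Int) 0 +
          PySem.List.pyGetD (pre ++ x :: xs) j 0)
          = (fun y => x + y) ∘ (fun j => PySem.List.pyGetD (pre ++ x :: xs) j 0) := by
        funext j; simp [hx]
      rw [hfun, ← List.map_map, hdrop]
    rw [hmap]
    have htail := ih (pre ++ [x])
    have e1 : pre ++ [x] ++ xs = pre ++ x :: xs := by simp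
    have e2 : (((pre ++ [x]).length : Nat) : Int) = (pre.length : Int) + 1 := by
      simp
    rw [e1, e2] at htail
    rw [pairSums, htail]

-- in a (≤)-sorted list, no two equal neighbours ⟺ no duplicates at all
lemma adj_nodup : ∀ (s : List Int), s.Pairwise (fun a b => a ≤ b) →
    (((s.zip (s.drop 1)).any (fun p => p.1 == p.2)) = false ↔ s.Nodup)
  | [], _ => by simp
  | [a], _ => by simp
  | a :: b :: t, hp => by
    have hab : a ≤ b := (List.pairwise_cons.mp hp).1 b (by simp)
    have hpt : (b :: t).Pairwise (fun a b => a ≤ b) := (List.pairwise_cons.mp hp).2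
    have ih := adj_nodup (b :: t) hpt
    by_cases he : a = b
    · subst he; simp
    · have halt : a ∉ b :: t := by
        intro hm
        rcases List.mem_cons.mp hm with h | h
        · exact he h
        · exact he (le_antisymm hab ((List.pairwise_cons.mp hpt).1 a h))
      simp only [List.drop_succ_cons, List.drop_zero, List.zip_cons_cons, List.any_cons,
        List.nodup_cons, Bool.or_eq_false_iff, beq_eq_false_iff_ne, ne_eq] at *
      tauto

-- hasAdjDup is a duplicate test
lemma hasAdjDup_iff (xs : List Int) : hasAdjDup xs = false ↔ xs.Nodup := by
  rw [hasAdjDup, PySem.List.slice_from_one, ← List.drop_one,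
      adj_nodup _ (PySem.List.sorted_pairwise xs (fun x => x) )]
  exact (PySem.List.sorted_perm xs (fun x => x) false).nodup_iff

-- ===== VERDICT (by name: the statement is the Claim_ definition above) =====
theorem answer_spec : Claim_equal_answer := by
  intro A _
  unfold Spec_answer answer answer_alt
  simp only [PySem.Set.len]
  by_cases hd : A.Nodup
  · have hg : (A.length : Int) = ((PySem.Set.ofList A).length : Int) := by
      exact_mod_cast ((len_ofList_eq_iff_nodup A).mpr hd).symm
    rw [if_neg (not_not_intro hg), if_neg (by simp [hasAdjDup_iff, hd])]
    have hflat : (PySem.List.pyRange 0 ((A.length : Int)) 1).flatMap (fun i =>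
        (PySem.List.pyRange (i + 1) ((A.length : Int)) 1).map (fun j =>
          PySem.List.pyGetD A i 0 + PySem.List.pyGetD A j 0)) = pairSums A := by
      simpa using a_flat [] A
    have hfold : (PySem.List.pyRange 0 ((A.length : Int)) 1).foldl (fun acc i =>
        (PySem.List.pyRange (i + 1) ((A.length : Int)) 1).foldl (fun acc j =>
          answerStep acc (PySem.List.pyGetD A i 0 + PySem.List.pyGetD A j 0)) acc)
        (some ([] : List Int)) = (pairSums A).foldl answerStep (some []) := by
      rw [← hflat, List.foldl_flatMap]
      simp only [List.foldl_map]
    rw [hflat, hfold]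
    by_cases hs : (pairSums A).Nodup
    · have h1 : (pairSums A).foldl answerStep (some []) ≠ none := by
        rw [Ne, scan_eq_none_iff _ _ List.nodup_nil]
        simpa using hs
      rcases hres : (pairSums A).foldl answerStep (some []) with _ | ls
      · exact absurd hres h1
      · rw [if_neg (by simp [hasAdjDup_iff, hs])]
    · have h1 : (pairSums A).foldl answerStep (some []) = none := by
        rw [scan_eq_none_iff _ _ List.nodup_nil]; simpa using hs
      rw [h1, if_pos (by simp [← Bool.not_eq_false, hasAdjDup_iff, hs])]
  · have hg : (A.length : Int) ≠ ((PySem.Set.ofList A).length : Int) := by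
      intro h
      exact hd ((len_ofList_eq_iff_nodup A).mp (by exact_mod_cast h.symm))
    rw [if_pos hg, if_pos (by simp [← Bool.not_eq_false, hasAdjDup_iff, hd])]
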